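-- pv_equiv track=rewrite | github.com/ishita7077/runpod_braindiff_test | backend/pattern_detector.py | _coalesce_blocks
-- ===== SOURCE A (Python) =====
-- def _coalesce_blocks(active: list[bool], min_duration: int) -> list[tuple[int, int]]:
--     """Return [(start_idx_inclusive, end_idx_inclusive), …] for runs of True
--     at least `min_duration` long. Indices are timesteps; the caller maps
--     them to seconds using the run's duration."""
--     blocks: list[tuple[int, int]] = []
--     i = 0
--     n = len(active)
--     while i < n:
--         if not active[i]:
--             i += 1
--             continue
--         start = i
--         while i < n and active[i]:
--             i += 1
--         end = i - 1
--         if (end - start + 1) >= min_duration: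
--             blocks.append((start, end))
--     return blocks
-- ===== SOURCE B (Python) =====
-- def _coalesce_blocks(active: list[bool], min_duration: int) -> list[tuple[int, int]]:
--     """Boundary decomposition: collect run-start indices and run-end indices,
--     then pair them up and keep the sufficiently long runs."""
--     n = len(active)
--     starts = [i for i in range(n) if active[i] and (i == 0 or not active[i - 1])]
--     ends = [i for i in range(n) if active[i] and (i == n - 1 or not active[i + 1])]
--     return [(s, e) for s, e in zip(starts, ends) if e - s + 1 >= min_duration]
-- ===== Notes on version B (the rewrite author's own statement) =====
-- stated objective: alternative
-- what changed: Replaces A's skip-then-consume two-pointer while loop with a boundary decomposition: build the list of run-start indices and the list of run-end indices, zip them into runs and filter by length.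
import Mathlib
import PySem

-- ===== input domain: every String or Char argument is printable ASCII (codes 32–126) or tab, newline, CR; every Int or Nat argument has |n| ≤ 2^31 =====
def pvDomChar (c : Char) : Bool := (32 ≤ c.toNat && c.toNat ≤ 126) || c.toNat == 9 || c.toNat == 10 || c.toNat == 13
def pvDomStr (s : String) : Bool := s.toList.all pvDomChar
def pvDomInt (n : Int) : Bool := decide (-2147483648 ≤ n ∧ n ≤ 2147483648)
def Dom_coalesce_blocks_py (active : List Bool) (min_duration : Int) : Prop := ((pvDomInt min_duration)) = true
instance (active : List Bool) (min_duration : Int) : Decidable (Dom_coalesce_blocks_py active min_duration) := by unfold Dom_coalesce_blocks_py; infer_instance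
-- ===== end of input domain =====

-- B replaces A's skip-then-consume two-pointer loop with a boundary decomposition
-- (run-start indices and run-end indices zipped and filtered); alternative, same cost.
-- All list indexing in both Pythons is guarded to be in range, so `List.getD` is exact.

-- ===== PORT A =====
-- inner `while i < n and active[i]: i += 1`, returns the final i.
-- The loop is made structural with fuel n - i (i increases by 1 per iteration,
-- so the fuel never runs out before the loop condition fails): same computation.
def pyConsumeF (active : List Bool) (n : Nat) : Nat → Nat → Nat
  | 0, i => i
  | fuel + 1, i =>
    if i < n ∧ active.getD i false = true then pyConsumeF active n fuel (i + 1) else i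

def pyConsume (active : List Bool) (n i : Nat) : Nat := pyConsumeF active n (n - i) i

-- outer `while i < n` loop of A, carrying `blocks`; fuel n suffices since i
-- strictly increases each iteration: same computation, made structural.
def pyLoopAF (active : List Bool) (n : Nat) (min_duration : Int) :
    Nat → Nat → List (Int × Int) → List (Int × Int)
  | 0, _, blocks => blocks
  | fuel + 1, i, blocks =>
    if i < n then
      if active.getD i false = false then
        pyLoopAF active n min_duration fuel (i + 1) blocks
      else
        let start := i
        let i' := pyConsume active n i
        let e : Nat := i' - 1
        pyLoopAF active n min_duration fuel i'
          (blocks ++ if min_duration ≤ (e : Int) - (start : Int) + 1 then [((start : Int), (e : Int))] else [])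
    else blocks

def coalesce_blocks_py (active : List Bool) (min_duration : Int) : List (Int × Int) :=
  pyLoopAF active active.length min_duration active.length 0 []

-- ===== PORT B =====
def coalesce_blocks_py_alt (active : List Bool) (min_duration : Int) : List (Int × Int) :=
  let n := active.length
  let starts := (List.range n).filter
    (fun i => active.getD i false && (i == 0 || active.getD (i - 1) false == false))
  let ends := (List.range n).filter
    (fun i => active.getD i false && (i == n - 1 || active.getD (i + 1) false == false))
  ((starts.zip ends).filter
    (fun p => min_duration ≤ (p.2 : Int) - (p.1 : Int) + 1)).map
    (fun p => ((p.1 : Int), (p.2 : Int)))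

-- ===== PRECONDITION & SPEC =====
def Spec_coalesce_blocks_py (active : List Bool) (min_duration : Int) (out : List (Int × Int)) : Prop := out = coalesce_blocks_py_alt active min_duration
instance (active : List Bool) (min_duration : Int) (out : List (Int × Int)) : Decidable (Spec_coalesce_blocks_py active min_duration out) := by unfold Spec_coalesce_blocks_py; infer_instance

-- ===== CLAIM (what is proved, stated in full; the proofs are below) =====
def Claim_equal_coalesce_blocks_py : Prop := ∀ (active : List Bool) (min_duration : Int), Dom_coalesce_blocks_py active min_duration → Spec_coalesce_blocks_py active min_duration (coalesce_blocks_py active min_duration)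

-- ===== LEMMAS AND PROOFS =====

-- canonical run decomposition: (start, end) of each maximal run of `true`, from offset k
def runsSpec : List Bool → Nat → List (Nat × Nat)
  | [], _ => []
  | false :: t, k => runsSpec t (k + 1)
  | true :: t, k =>
    (k, k + (t.takeWhile (fun b => b)).length) ::
      runsSpec (t.dropWhile (fun b => b)) (k + 1 + (t.takeWhile (fun b => b)).length)
termination_by t _ => t.length
decreasing_by
  · simp
  · have := List.length_dropWhile_le (fun b => b) t; simp; omega

-- the filter-and-cast both ports apply to the runs
def convRuns (min_duration : Int) (rs : List (Nat × Nat)) : List (Int × Int) :=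
  (rs.filter (fun p => min_duration ≤ (p.2 : Int) - (p.1 : Int) + 1)).map
    (fun p => ((p.1 : Int), (p.2 : Int)))

-- recursive characterisations of B's two index lists
def sAux : List Bool → Bool → Nat → List Nat
  | [], _, _ => []
  | b :: t, prev, k => (if b && !prev then [k] else []) ++ sAux t b (k + 1)

def eAux : List Bool → Nat → List Nat
  | [], _ => []
  | b :: t, k => (if b && !(t.headD false) then [k] else []) ++ eAux t (k + 1)

theorem getD_head_drop (active : List Bool) (i : Nat) :
    active.getD i false = (active.drop i).headD false := by
  induction active generalizing i with
  | nil => simp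
  | cons a t ih =>
    cases i with
    | zero => simp
    | succ j => simpa using ih j

theorem drop_cons_of_lt (active : List Bool) (i : Nat) (h : i < active.length) :
    active.drop i = active.getD i false :: active.drop (i + 1) := by
  rw [List.drop_eq_getElem_cons h, List.getD_eq_getElem active false h]

theorem pyConsumeF_eq (active : List Bool) : ∀ (fuel i : Nat), active.length - i ≤ fuel →
    pyConsumeF active active.length fuel i
      = i + ((active.drop i).takeWhile (fun b => b)).length := by
  intro fuel
  induction fuel with
  | zero =>
    intro i h
    have hge : active.length ≤ i := by omega
    rw [List.drop_eq_nil_of_le hge]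
    simp [pyConsumeF]
  | succ fuel ih =>
    intro i h
    rw [pyConsumeF]
    by_cases hc : i < active.length ∧ active.getD i false = true
    · rw [if_pos hc, ih (i + 1) (by omega)]
      rw [drop_cons_of_lt active i hc.1, hc.2]
      simp [List.takeWhile_cons]
      omega
    · rw [if_neg hc]
      rcases Nat.lt_or_ge i active.length with hlt | hge
      · have hb : active.getD i false = false := by
          by_contra hb
          exact hc ⟨hlt, by simpa using hb⟩
        rw [drop_cons_of_lt active i hlt, hb]
        simp
      · rw [List.drop_eq_nil_of_le hge]
        simp

theorem pyConsume_eq (active : List Bool) (i : Nat) :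
    pyConsume active active.length i
      = i + ((active.drop i).takeWhile (fun b => b)).length :=
  pyConsumeF_eq active (active.length - i) i (by omega)

theorem dropWhile_eq_drop (p : Bool → Bool) (l : List Bool) :
    l.dropWhile p = l.drop (l.takeWhile p).length := by
  induction l with
  | nil => simp
  | cons a t ih => by_cases h : p a <;> simp [List.dropWhile_cons, List.takeWhile_cons, h, ih]

theorem convRuns_cons (md : Int) (s e : Nat) (rs : List (Nat × Nat)) :
    convRuns md ((s, e) :: rs) =
      (if md ≤ (e : Int) - (s : Int) + 1 then [((s : Int), (e : Int))] else []) ++ convRuns md rs := by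
  simp only [convRuns, List.filter_cons]
  split_ifs with h <;> simp_all

-- A's outer loop produces `blocks ++ convRuns md (runsSpec (active.drop i) i)`
theorem pyLoopAF_eq (active : List Bool) (md : Int) : ∀ (fuel i : Nat) (blocks : List (Int × Int)),
    active.length - i ≤ fuel →
    pyLoopAF active active.length md fuel i blocks =
      blocks ++ convRuns md (runsSpec (active.drop i) i) := by
  intro fuel
  induction fuel with
  | zero =>
    intro i blocks h
    have hge : active.length ≤ i := by omega
    rw [List.drop_eq_nil_of_le hge]
    simp [pyLoopAF, runsSpec, convRuns]
  | succ fuel ih =>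
    intro i blocks h
    rw [pyLoopAF]
    by_cases hlt : i < active.length
    · rw [if_pos hlt]
      by_cases hb : active.getD i false = false
      · rw [if_pos hb, ih (i + 1) blocks (by omega)]
        rw [drop_cons_of_lt active i hlt, hb, runsSpec]
      · rw [if_neg hb]
        have hbt : active.getD i false = true := by simpa using hb
        have hdrop : active.drop i = true :: active.drop (i + 1) := by
          rw [drop_cons_of_lt active i hlt, hbt]
        have htw : ((active.drop i).takeWhile (fun b => b)).length
            = 1 + ((active.drop (i + 1)).takeWhile (fun b => b)).length := by
          rw [hdrop]; simp [List.takeWhile_cons]; omega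
        have hcons : pyConsume active active.length i
            = i + 1 + ((active.drop (i + 1)).takeWhile (fun b => b)).length := by
          rw [pyConsume_eq, htw]; omega
        have hdw : active.drop (pyConsume active active.length i)
            = (active.drop (i + 1)).dropWhile (fun b => b) := by
          rw [hcons, dropWhile_eq_drop, List.drop_drop]
        simp only []
        rw [ih (pyConsume active active.length i) _ (by omega)]
        rw [hdrop]
        rw [runsSpec]
        rw [convRuns_cons, hdw, hcons]
        have he : i + 1 + ((active.drop (i + 1)).takeWhile (fun b => b)).length - 1
            = i + ((active.drop (i + 1)).takeWhile (fun b => b)).length := by omega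
        rw [he, List.append_assoc]
    · rw [if_neg hlt, List.drop_eq_nil_of_le (by omega)]
      simp [runsSpec, convRuns]

-- sAux with prev = true skips the leading run
theorem sAux_skip : ∀ (t : List Bool) (j : Nat), sAux t true j =
    sAux (t.dropWhile (fun b => b)) false (j + (t.takeWhile (fun b => b)).length) := by
  intro t
  induction t with
  | nil => intro j; simp [sAux]
  | cons b u ih =>
    intro j
    cases b with
    | false => simp [sAux, List.dropWhile_cons, List.takeWhile_cons]
    | true =>
      have h1 : sAux (true :: u) true j = sAux u true (j + 1) := by simp [sAux]
      have h2 : ((true :: u).dropWhile (fun b => b)) = u.dropWhile (fun b => b) := by simp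
      have h3 : ((true :: u).takeWhile (fun b => b)).length
          = (u.takeWhile (fun b => b)).length + 1 := by simp
      rw [h1, ih (j + 1), h2, h3]
      congr 1
      omega

-- eAux emits the end of the leading run
theorem eAux_run : ∀ (t : List Bool) (k : Nat), eAux (true :: t) k =
    (k + (t.takeWhile (fun b => b)).length) ::
      eAux (t.dropWhile (fun b => b)) (k + 1 + (t.takeWhile (fun b => b)).length) := by
  intro t
  induction t with
  | nil => intro k; simp [eAux]
  | cons b u ih =>
    intro k
    cases b with
    | false => simp [eAux, List.dropWhile_cons, List.takeWhile_cons]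
    | true =>
      have lhs : eAux (true :: true :: u) k = eAux (true :: u) (k + 1) := by
        simp [eAux]
      have h2 : ((true :: u).dropWhile (fun b => b)) = u.dropWhile (fun b => b) := by simp
      have h3 : ((true :: u).takeWhile (fun b => b)).length
          = (u.takeWhile (fun b => b)).length + 1 := by simp
      rw [lhs, ih (k + 1), h2, h3]
      congr 1
      · omega
      · congr 1
        omega

-- the zip of B's boundary lists is exactly the run decomposition
theorem zip_sAux_eAux (t : List Bool) (k : Nat) :
    (sAux t false k).zip (eAux t k) = runsSpec t k := by
  induction t, k using runsSpec.induct with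
  | case1 k => simp [sAux, eAux, runsSpec]
  | case2 t k ih => simp only [sAux, eAux, runsSpec]; simpa using ih
  | case3 t k ih =>
    rw [runsSpec]
    have hs : sAux (true :: t) false k = k :: sAux t true (k + 1) := by simp [sAux]
    rw [hs, sAux_skip, eAux_run]
    simp only [List.zip_cons_cons]
    rw [show k + 1 + (t.takeWhile (fun b => b)).length
        = k + 1 + (t.takeWhile (fun b => b)).length from rfl]
    rw [show (k + 1) + (t.takeWhile (fun b => b)).length
        = k + 1 + (t.takeWhile (fun b => b)).length by omega]
    rw [ih]

-- B's range-filtered starts list equals sAux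
theorem starts_general (full : List Bool) : ∀ (m k : Nat), k ≤ full.length → m = full.length - k →
    (List.range' k m).filter
      (fun i => full.getD i false && (i == 0 || full.getD (i - 1) false == false))
      = sAux (full.drop k) (decide (k ≠ 0) && full.getD (k - 1) false) k := by
  intro m
  induction m with
  | zero =>
    intro k hk hm
    have : k = full.length := by omega
    subst this
    simp [sAux, List.drop_eq_nil_of_le]
  | succ m ih =>
    intro k hk hm
    have hlt : k < full.length := by omega
    rw [List.range'_succ, List.filter_cons]
    rw [drop_cons_of_lt full k hlt, sAux]
    have hih := ih (k + 1) (by omega) (by omega)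
    have hprev : (decide (k + 1 ≠ 0) && full.getD (k + 1 - 1) false) = full.getD k false := by
      simp
    rw [hprev] at hih
    rw [hih]
    have hcond : (full.getD k false && (k == 0 || full.getD (k - 1) false == false))
        = (full.getD k false && !(decide (k ≠ 0) && full.getD (k - 1) false)) := by
      by_cases h0 : k = 0
      · subst h0; simp
      · cases full.getD (k - 1) false <;> simp [h0]
    rw [hcond]
    cases hb : (full.getD k false && !(decide (k ≠ 0) && full.getD (k - 1) false)) <;> simp [hb]

-- B's range-filtered starts list equals sAux
theorem starts_eq (active : List Bool) :
    (List.range active.length).filter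
      (fun i => active.getD i false && (i == 0 || active.getD (i - 1) false == false))
      = sAux active false 0 := by
  rw [List.range_eq_range']
  have := starts_general active active.length 0 (by omega) (by omega)
  simpa using this

-- B's range-filtered ends list equals eAux
theorem ends_general (full : List Bool) : ∀ (m k : Nat), k ≤ full.length → m = full.length - k →
    (List.range' k m).filter
      (fun i => full.getD i false && (i == full.length - 1 || full.getD (i + 1) false == false))
      = eAux (full.drop k) k := by
  intro m
  induction m with
  | zero =>
    intro k hk hm
    have : k = full.length := by omega
    subst this
    simp [eAux, List.drop_eq_nil_of_le]
  | succ m ih =>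
    intro k hk hm
    have hlt : k < full.length := by omega
    rw [List.range'_succ, List.filter_cons]
    rw [drop_cons_of_lt full k hlt, eAux]
    rw [ih (k + 1) (by omega) (by omega)]
    have hhead : (full.drop (k + 1)).headD false = full.getD (k + 1) false :=
      (getD_head_drop full (k + 1)).symm
    have hcond : (full.getD k false && (k == full.length - 1 || full.getD (k + 1) false == false))
        = (full.getD k false && !((full.drop (k + 1)).headD false)) := by
      rw [hhead]
      by_cases hl : k = full.length - 1
      · have : full.length ≤ k + 1 := by omega
        rw [List.getD_eq_default _ _ this]
        simp [hl]
      · cases full.getD (k + 1) false <;> simp [hl]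
    rw [hcond]
    cases hb : (full.getD k false && !((full.drop (k + 1)).headD false)) <;> simp [hb]

-- B's range-filtered ends list equals eAux
theorem ends_eq (active : List Bool) :
    (List.range active.length).filter
      (fun i => active.getD i false && (i == active.length - 1 || active.getD (i + 1) false == false))
      = eAux active 0 := by
  rw [List.range_eq_range']
  exact ends_general active active.length 0 (by omega) (by omega)

-- ===== VERDICT (by name: the statement is the Claim_ definition above) =====
theorem coalesce_blocks_py_spec : Claim_equal_coalesce_blocks_py := by
  intro active md _
  unfold Spec_coalesce_blocks_py coalesce_blocks_py coalesce_blocks_py_alt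
  dsimp only
  rw [pyLoopAF_eq active md active.length 0 [] (by omega)]
  rw [starts_eq, ends_eq, zip_sAux_eAux]
  simp [convRuns]
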